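-- pv_equiv track=rewrite | github.com/evocellnet/phosphocontrol | code/src/protein_utility.py | group_indices
-- ===== SOURCE A (Python) =====
-- from typing import Union, Tuple, List
--
-- def group_indices(input_list: List[int]) -> List[List[int]]:
--     """
--     e.g [1, 1, 1, 2, 2, 3, 3, 3, 4] -> [[0, 1, 2], [3, 4], [5, 6, 7], [8]]
--     """
--     output_list = []
--     current_list = []
--     current_index = None
--     for i in range(len(input_list)):
--         if current_index is None:
--             current_index = input_list[i]
--         if input_list[i] == current_index:
--             current_list.append(i)
--         else:
--             output_list.append(current_list)
--             current_list = [i]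
--         current_index = input_list[i]
--     output_list.append(current_list)
--     return output_list
-- ===== SOURCE B (Python) =====
-- def group_indices(input_list):
--     n = len(input_list)
--     bounds = [0] + [i for i in range(1, n) if input_list[i] != input_list[i - 1]] + [n]
--     return [list(range(s, e)) for s, e in zip(bounds, bounds[1:])]
-- ===== Notes on version B (the rewrite author's own statement) =====
-- stated objective: alternative
-- what changed: Instead of A's single stateful pass flushing current_list on value change, B first computes the list of run-boundary positions ([0] + change points + [n]) and then materialises each group as list(range(s, e)) over consecutive boundary pairs.
import Mathlib
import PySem

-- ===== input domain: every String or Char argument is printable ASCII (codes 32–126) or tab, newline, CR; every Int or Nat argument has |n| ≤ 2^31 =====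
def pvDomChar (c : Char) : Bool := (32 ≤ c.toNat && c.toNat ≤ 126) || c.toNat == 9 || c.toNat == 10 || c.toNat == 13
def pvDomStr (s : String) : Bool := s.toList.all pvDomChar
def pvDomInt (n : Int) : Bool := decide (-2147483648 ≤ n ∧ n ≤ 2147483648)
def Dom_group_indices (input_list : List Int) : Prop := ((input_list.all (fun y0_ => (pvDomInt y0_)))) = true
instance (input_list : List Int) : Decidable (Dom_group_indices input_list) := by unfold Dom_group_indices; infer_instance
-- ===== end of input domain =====

-- B computes the run boundary positions first and then materialises each group as range(s, e),
-- instead of A's single flushing pass with current_index/current_list state (alternative decomposition).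

-- ===== PORT A =====
-- A's loop body over i in range(len(input_list)), state (output_list, current_list, current_index)
def aStep (input_list : List Int) (st : List (List Int) × List Int × Option Int) (i : Nat) :
    List (List Int) × List Int × Option Int :=
  let out := st.1
  let cur := st.2.1
  let ci : Option Int :=
    match st.2.2 with
    | none => some (input_list.getD i 0)
    | some c => some c
  if some (input_list.getD i 0) = ci then
    (out, cur ++ [(i : Int)], some (input_list.getD i 0))
  else
    (out ++ [cur], [(i : Int)], some (input_list.getD i 0))

def group_indices (input_list : List Int) : List (List Int) :=
  let s := (List.range input_list.length).foldl (aStep input_list) ([], [], none)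
  s.1 ++ [s.2.1]

-- ===== PORT B =====
-- transliteration of Source B: bounds = [0] + [i in range(1,n) with a change at i] + [n];
-- result = [list(range(s, e)) for consecutive pairs (s, e) of bounds].
-- The indices i and i-1 are always in range, so pyGetD is exact here.
def group_indices_alt (input_list : List Int) : List (List Int) :=
  let n : Int := input_list.length
  let bounds : List Int :=
    0 :: ((PySem.List.pyRange 1 n 1).filter
        (fun i => PySem.List.pyGetD input_list i 0 != PySem.List.pyGetD input_list (i - 1) 0)
      ++ [n])
  (bounds.zip (PySem.List.slice bounds (some 1) none)).map (fun p => PySem.List.pyRange p.1 p.2 1)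

-- ===== PRECONDITION & SPEC =====
def Spec_group_indices (input_list : List Int) (out : List (List Int)) : Prop := out = group_indices_alt input_list
instance (input_list : List Int) (out : List (List Int)) : Decidable (Spec_group_indices input_list out) := by unfold Spec_group_indices; infer_instance

-- ===== CLAIM (what is proved, stated in full; the proofs are below) =====
def Claim_equal_group_indices : Prop := ∀ (input_list : List Int), Dom_group_indices input_list → Spec_group_indices input_list (group_indices input_list)

-- ===== LEMMAS AND PROOFS =====

-- A's loop, after the first iteration, as a structural recursion on the remaining suffix
def aGo (xs : List Int) (i : Nat) (out : List (List Int)) (cur : List Int) (v : Int) :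
    List (List Int) × List Int × Option Int :=
  match xs with
  | [] => (out, cur, some v)
  | x :: rest =>
    if x = v then aGo rest (i + 1) out (cur ++ [(i : Int)]) x
    else aGo rest (i + 1) (out ++ [cur]) [(i : Int)] x

-- the common run-structured form both ports are reduced to
def altGo (xs : List Int) (i : Nat) : List (List Int) :=
  match xs with
  | [] => []
  | x :: rest =>
    let k := (rest.takeWhile (fun y => y == x)).length
    ((List.range (k + 1)).map (fun j => ((i + j : Nat) : Int))) :: altGo (rest.drop k) (i + k + 1)
termination_by xs.length
decreasing_by
  simp [List.length_drop]

-- B's inner boundary comprehension, on the Nat side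
def innerB (l : List Int) : List Nat :=
  (List.range' 1 (l.length - 1)).filter (fun i => l.getD i 0 != l.getD (i - 1) 0)

-- B's zip-of-consecutive-bounds pass, on the Nat side
def pairsMap : List Nat → List (List Int)
  | a :: b :: t => ((List.range (b - a)).map (fun j => ((a + j : Nat) : Int))) :: pairsMap (b :: t)
  | _ => []

lemma map_shift (i k : Nat) :
    (List.range (k + 1)).map (fun j => ((i + j : Nat) : Int)) =
      (i : Int) :: (List.range k).map (fun j => ((i + 1 + j : Nat) : Int)) := by
  rw [List.range_succ_eq_map, List.map_cons, List.map_map]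
  refine congrArg₂ List.cons (by simp) (List.map_congr_left ?_)
  intro a _
  simp only [Function.comp_apply]
  omega

lemma foldA (full : List Int) (m : Nat) : ∀ (p : Nat) (out : List (List Int)) (cur : List Int) (v : Int),
    p + m = full.length →
    (List.range' p m).foldl (aStep full) (out, cur, some v) = aGo (full.drop p) p out cur v := by
  induction m with
  | zero =>
    intro p out cur v h
    have : full.drop p = [] := by
      apply List.drop_eq_nil_of_le; omega
    simp [this, aGo]
  | succ m ih =>
    intro p out cur v h
    have hp : p < full.length := by omega
    have hd : full.drop p = full[p] :: full.drop (p + 1) := List.drop_eq_getElem_cons hp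
    have hg : full[p]? = some full[p] := List.getElem?_eq_getElem hp
    rw [List.range'_succ, List.foldl_cons, hd]
    by_cases hv : full[p] = v
    · have hs : aStep full (out, cur, some v) p = (out, cur ++ [(p : Int)], some full[p]) := by
        simp [aStep, hg, hv]
      rw [hs, ih (p + 1) _ _ _ (by omega), aGo, if_pos hv]
    · have hs : aStep full (out, cur, some v) p = (out ++ [cur], [(p : Int)], some full[p]) := by
        simp [aStep, hg, hv]
      rw [hs, ih (p + 1) _ _ _ (by omega)]
      simp [aGo, hv]

lemma altGo_nil (i : Nat) : altGo [] i = [] := by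
  unfold altGo
  rfl

lemma altGo_cons (x : Int) (rest : List Int) (i : Nat) :
    altGo (x :: rest) i =
      ((List.range ((rest.takeWhile (fun y => y == x)).length + 1)).map (fun j => ((i + j : Nat) : Int)))
        :: altGo (rest.drop (rest.takeWhile (fun y => y == x)).length)
            (i + (rest.takeWhile (fun y => y == x)).length + 1) := by
  conv_lhs => unfold altGo

lemma flatten (xs : List Int) : ∀ (i : Nat) (out : List (List Int)) (cur : List Int) (v : Int),
    (aGo xs i out cur v).1 ++ [(aGo xs i out cur v).2.1] =
      out ++ ((cur ++ (List.range (xs.takeWhile (fun y => y == v)).length).map (fun j => ((i + j : Nat) : Int)))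
        :: altGo (xs.drop (xs.takeWhile (fun y => y == v)).length) (i + (xs.takeWhile (fun y => y == v)).length)) := by
  induction xs with
  | nil => intro i out cur v; simp [aGo, altGo_nil]
  | cons x rest ih =>
    intro i out cur v
    by_cases hv : x = v
    · subst hv
      rw [aGo, if_pos rfl, ih]
      have htw : (x :: rest).takeWhile (fun y => y == x) = x :: rest.takeWhile (fun y => y == x) := by
        simp
      rw [htw]
      simp only [List.length_cons, List.drop_succ_cons, map_shift]
      generalize (rest.takeWhile (fun y => y == x)).length = k
      have harith : i + (k + 1) = i + 1 + k := by omega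
      rw [harith]
      simp
    · rw [aGo, if_neg hv, ih]
      have htw : (x :: rest).takeWhile (fun y => y == v) = [] := by
        simp [hv]
      rw [htw]
      simp only [List.length_nil, List.range_zero, List.map_nil, List.append_nil, List.drop_zero,
        Nat.add_zero]
      rw [altGo_cons]
      simp only [map_shift]
      generalize (rest.takeWhile (fun y => y == x)).length = k
      have harith : i + k + 1 = i + 1 + k := by omega
      rw [harith]
      simp

lemma a_eq_altGo (x : Int) (xs : List Int) :
    group_indices (x :: xs) = altGo (x :: xs) 0 := by
  have h0 : aStep (x :: xs) ([], [], none) 0 = ([], [(0 : Int)], some x) := by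
    simp [aStep]
  have hr : List.range (x :: xs).length = 0 :: List.range' 1 xs.length := by
    rw [List.range_eq_range']
    simp [List.range'_succ]
  unfold group_indices
  rw [hr, List.foldl_cons, h0, foldA (x :: xs) xs.length 1 [] [(0 : Int)] x (by simp; omega)]
  simp only [List.drop_succ_cons]
  rw [flatten]
  rw [altGo_cons, map_shift]
  simp [Nat.add_comm]


-- B's port equals the Nat-side formulation
lemma getD_drop (l : List Int) (n i : Nat) (d : Int) :
    (l.drop n).getD i d = l.getD (n + i) d := by
  simp [List.getD_eq_getElem?_getD, List.getElem?_drop]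

lemma pyRange_block (a b : Nat) :
    PySem.List.pyRange (a : Int) (b : Int) 1 =
      (List.range (b - a)).map (fun j => ((a + j : Nat) : Int)) := by
  rw [PySem.List.pyRange_one]
  have h : ((b : Int) - (a : Int)).toNat = b - a := by omega
  rw [h]
  refine List.map_congr_left ?_
  intro j _
  push_cast
  ring

lemma zipPairs (bs : List Nat) :
    (((bs.map (fun a : Nat => (a : Int))).zip ((bs.map (fun a : Nat => (a : Int))).tail)).map
        (fun p => PySem.List.pyRange p.1 p.2 1)) = pairsMap bs := by
  induction bs with
  | nil => rfl
  | cons a t ih =>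
    cases t with
    | nil => rfl
    | cons b t' =>
      simp only [List.map_cons, List.tail_cons] at ih
      simp only [List.map_cons, List.tail_cons, List.zip_cons_cons, pairsMap]
      exact congrArg₂ List.cons (pyRange_block a b) ih

lemma pyRange_cast (l : List Int) :
    PySem.List.pyRange 1 (l.length : Int) 1
      = (List.range' 1 (l.length - 1)).map (fun a : Nat => (a : Int)) := by
  rw [PySem.List.pyRange_one]
  have h1 : (((l.length : Int)) - 1).toNat = l.length - 1 := by omega
  rw [h1, List.range'_eq_map_range, List.map_map]
  refine List.map_congr_left ?_
  intro j _
  simp only [Function.comp_apply]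
  push_cast
  ring

lemma filter_cast (l : List Int) :
    (PySem.List.pyRange 1 (l.length : Int) 1).filter
        (fun i => PySem.List.pyGetD l i 0 != PySem.List.pyGetD l (i - 1) 0)
      = (innerB l).map (fun a : Nat => (a : Int)) := by
  rw [pyRange_cast, List.filter_map]
  unfold innerB
  refine congrArg (List.map _) ?_
  refine List.filter_congr ?_
  intro i hi
  rw [List.mem_range'_1] at hi
  simp only [Function.comp_apply]
  have c2 : (i : Int) - 1 = ((i - 1 : Nat) : Int) := by omega
  rw [c2]
  simp only [PySem.List.pyGetD_natCast]

lemma alt_eq_pairs (l : List Int) :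
    group_indices_alt l = pairsMap (0 :: (innerB l ++ [l.length])) := by
  unfold group_indices_alt
  dsimp only
  rw [PySem.List.slice_from_one, filter_cast]
  have hb : (0 : Int) :: ((innerB l).map (fun a : Nat => (a : Int)) ++ [(l.length : Int)])
      = (0 :: (innerB l ++ [l.length])).map (fun a : Nat => (a : Int)) := by
    simp
  rw [hb, zipPairs]

-- run-structure characterisation of B's boundary list
lemma takeWhile_run (q : Int → Bool) (l : List Int) (j : Nat)
    (hj : j < (l.takeWhile q).length) : q (l.getD j 0) = true := by
  induction l generalizing j with
  | nil => simp at hj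
  | cons a t ih =>
    by_cases hqa : q a
    · rw [List.takeWhile_cons_of_pos hqa] at hj
      cases j with
      | zero => simpa using hqa
      | succ j' =>
        simp only [List.getD_cons_succ]
        exact ih j' (by simpa using hj)
    · rw [List.takeWhile_cons_of_neg hqa] at hj
      simp at hj

lemma takeWhile_stop (q : Int → Bool) (l : List Int)
    (hk : (l.takeWhile q).length < l.length) :
    q (l.getD (l.takeWhile q).length 0) = false := by
  induction l with
  | nil => simp at hk
  | cons a t ih =>
    by_cases hqa : q a
    · rw [List.takeWhile_cons_of_pos hqa] at hk ⊢
      simp only [List.length_cons, List.getD_cons_succ]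
      exact ih (by simpa using hk)
    · rw [List.takeWhile_cons_of_neg hqa]
      simpa using hqa

lemma range'_split (s a b : Nat) :
    List.range' s (a + b) = List.range' s a ++ List.range' (s + a) b := by
  induction a generalizing s with
  | zero => simp
  | succ a ih =>
    have h1 : a + 1 + b = (a + b) + 1 := by omega
    rw [h1, List.range'_succ, List.range'_succ, ih (s + 1), List.cons_append]
    have h2 : s + 1 + a = s + (a + 1) := by omega
    rw [h2]

lemma range'_map_shift (c s m : Nat) :
    List.range' (c + s) m = (List.range' s m).map (fun j => c + j) := by
  induction m generalizing s with
  | zero => simp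
  | succ m ih =>
    rw [List.range'_succ, List.range'_succ, List.map_cons]
    have h1 : c + s + 1 = c + (s + 1) := by omega
    rw [h1, ih (s + 1)]

lemma innerB_cons_gen (x : Int) (rest : List Int) (k : Nat)
    (hk : k ≤ rest.length)
    (hrun : ∀ j, j < k → rest.getD j 0 = x)
    (hstop : k < rest.length → ¬ rest.getD k 0 = x) :
    (List.range' 1 rest.length).filter
        (fun i => (x :: rest).getD i 0 != (x :: rest).getD (i - 1) 0)
      = if k = rest.length then []
        else (k + 1) :: ((List.range' 1 (rest.length - k - 1)).filter
              (fun j => (rest.drop k).getD j 0 != (rest.drop k).getD (j - 1) 0)).map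
            (· + (k + 1)) := by
  have hcons : ∀ j : Nat, (x :: rest).getD (j + 1) 0 = rest.getD j 0 := fun j => by simp
  have hlow : ∀ i : Nat, i ≤ k → (x :: rest).getD i 0 = x := by
    intro i hi
    cases i with
    | zero => simp
    | succ j =>
      rw [hcons]
      exact hrun j (by omega)
  have hsplit : List.range' 1 rest.length
      = List.range' 1 k ++ List.range' (1 + k) (rest.length - k) := by
    have h2 : rest.length = k + (rest.length - k) := by omega
    conv_lhs => rw [h2]
    exact range'_split 1 k (rest.length - k)
  rw [hsplit, List.filter_append]
  have hfilt1 : (List.range' 1 k).filter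
      (fun i => (x :: rest).getD i 0 != (x :: rest).getD (i - 1) 0) = [] := by
    rw [List.filter_eq_nil_iff]
    intro i hi
    rw [List.mem_range'_1] at hi
    rw [hlow i (by omega), hlow (i - 1) (by omega)]
    simp
  rw [hfilt1, List.nil_append]
  by_cases hfull : k = rest.length
  · rw [if_pos hfull, hfull]
    simp
  · rw [if_neg hfull]
    have hklt : k < rest.length := lt_of_le_of_ne hk hfull
    obtain ⟨m, hm⟩ : ∃ m, rest.length - k = m + 1 := ⟨rest.length - k - 1, by omega⟩
    rw [hm, List.range'_succ, List.filter_cons]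
    have hp1 : ((x :: rest).getD (1 + k) 0 != (x :: rest).getD (1 + k - 1) 0) = true := by
      have e1 : (x :: rest).getD (1 + k) 0 = rest.getD k 0 := by
        rw [show 1 + k = k + 1 from by omega, hcons]
      have e2 : (x :: rest).getD (1 + k - 1) 0 = x := by
        rw [show 1 + k - 1 = k from by omega]
        exact hlow k le_rfl
      rw [e1, e2]
      simpa using hstop hklt
    rw [if_pos hp1]
    simp only [Nat.add_sub_cancel]
    refine congrArg₂ List.cons (by omega) ?_
    have hmap : List.range' (1 + k + 1) m = (List.range' 1 m).map (fun j => (k + 1) + j) := by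
      rw [← range'_map_shift (k + 1) 1 m]
      congr 1
      omega
    rw [hmap, List.filter_map]
    have hstep : ∀ j ∈ List.range' 1 m,
        ((fun i => (x :: rest).getD i 0 != (x :: rest).getD (i - 1) 0) ∘ (fun j => (k + 1) + j)) j
          = (fun j => (rest.drop k).getD j 0 != (rest.drop k).getD (j - 1) 0) j := by
      intro j hj
      rw [List.mem_range'_1] at hj
      simp only [Function.comp_apply]
      have e1 : (x :: rest).getD ((k + 1) + j) 0 = (rest.drop k).getD j 0 := by
        rw [show (k + 1) + j = (k + j) + 1 from by omega, hcons, getD_drop]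
      have e2 : (x :: rest).getD ((k + 1) + j - 1) 0 = (rest.drop k).getD (j - 1) 0 := by
        rw [show (k + 1) + j - 1 = (k + (j - 1)) + 1 from by omega, hcons, getD_drop]
      rw [e1, e2]
    rw [List.filter_congr hstep]
    refine List.map_congr_left ?_
    intro a _
    omega

lemma innerB_cons (x : Int) (rest : List Int) :
    innerB (x :: rest) =
      if (rest.takeWhile (fun y => y == x)).length = rest.length then []
      else ((rest.takeWhile (fun y => y == x)).length + 1) ::
        (innerB (rest.drop (rest.takeWhile (fun y => y == x)).length)).map
          (· + ((rest.takeWhile (fun y => y == x)).length + 1)) := by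
  have hkle : (rest.takeWhile (fun y => y == x)).length ≤ rest.length :=
    (List.takeWhile_prefix _).length_le
  have hrun : ∀ j, j < (rest.takeWhile (fun y => y == x)).length → rest.getD j 0 = x := by
    intro j hj
    have := takeWhile_run (fun y => y == x) rest j hj
    simpa using this
  have hstop : (rest.takeWhile (fun y => y == x)).length < rest.length →
      ¬ rest.getD (rest.takeWhile (fun y => y == x)).length 0 = x := by
    intro h hcon
    have := takeWhile_stop (fun y => y == x) rest h
    rw [hcon] at this
    simp at this
  have h := innerB_cons_gen x rest (rest.takeWhile (fun y => y == x)).length hkle hrun hstop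
  unfold innerB
  have hl1 : (x :: rest).length - 1 = rest.length := by simp
  rw [hl1, h]
  simp [List.length_drop]

-- the staged bounds construction collapses to the run recursion (fuel = a length bound)
lemma pairs_altGo_aux (N : Nat) : ∀ (l : List Int), l.length ≤ N → l ≠ [] → ∀ (i : Nat),
    pairsMap ((0 :: (innerB l ++ [l.length])).map (· + i)) = altGo l i := by
  induction N with
  | zero =>
    intro l hl hne i
    cases l with
    | nil => exact absurd rfl hne
    | cons x rest => simp at hl
  | succ N ih =>
    intro l hl hne i
    cases l with
    | nil => exact absurd rfl hne
    | cons x rest =>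
      rw [innerB_cons, altGo_cons]
      by_cases hfull : (rest.takeWhile (fun y => y == x)).length = rest.length
      · rw [if_pos hfull]
        have hdrop : rest.drop (rest.takeWhile (fun y => y == x)).length = [] := by
          rw [hfull]
          simp
        rw [hdrop, altGo_nil, hfull]
        simp only [List.nil_append, List.map_cons, List.map_nil, List.length_cons, pairsMap]
        refine congrArg₂ List.cons ?_ rfl
        have harith : rest.length + 1 + i - (0 + i) = rest.length + 1 := by omega
        rw [harith]
        refine List.map_congr_left ?_
        intro j _
        congr 1
        omega
      · rw [if_neg hfull]
        have hk : (rest.takeWhile (fun y => y == x)).length < rest.length :=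
          lt_of_le_of_ne (List.takeWhile_prefix _).length_le hfull
        have hslen : (rest.drop (rest.takeWhile (fun y => y == x)).length).length
            = rest.length - (rest.takeWhile (fun y => y == x)).length := by
          simp
        have hsne : rest.drop (rest.takeWhile (fun y => y == x)).length ≠ [] := by
          intro h
          rw [h] at hslen
          simp at hslen
          omega
        rw [List.cons_append]
        simp only [List.map_cons, List.length_cons, pairsMap]
        refine congrArg₂ List.cons ?_ ?_
        · have harith : (rest.takeWhile (fun y => y == x)).length + 1 + i - (0 + i)
              = (rest.takeWhile (fun y => y == x)).length + 1 := by omega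
          rw [harith]
          refine List.map_congr_left ?_
          intro j _
          congr 1
          omega
        · have hlist : ((rest.takeWhile (fun y => y == x)).length + 1 + i)
                :: (((innerB (rest.drop (rest.takeWhile (fun y => y == x)).length)).map
                      (· + ((rest.takeWhile (fun y => y == x)).length + 1)) ++ [rest.length + 1]).map (· + i))
              = (0 :: (innerB (rest.drop (rest.takeWhile (fun y => y == x)).length)
                  ++ [(rest.drop (rest.takeWhile (fun y => y == x)).length).length])).map
                  (· + ((rest.takeWhile (fun y => y == x)).length + 1 + i)) := by
            simp only [List.map_cons, List.map_append, List.map_map, hslen]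
            refine congrArg₂ List.cons (by omega) (congrArg₂ (· ++ ·) ?_ ?_)
            · refine List.map_congr_left ?_
              intro a _
              simp only [Function.comp_apply]
              omega
            · simp only [List.map_nil]
              congr 1
              omega
          rw [hlist, ih _ (by simp at hl ⊢; omega) hsne _]
          congr 1
          omega

lemma pairs_altGo (l : List Int) (hne : l ≠ []) (i : Nat) :
    pairsMap ((0 :: (innerB l ++ [l.length])).map (· + i)) = altGo l i :=
  pairs_altGo_aux l.length l le_rfl hne i

lemma main_nonempty (x : Int) (xs : List Int) :
    group_indices (x :: xs) = group_indices_alt (x :: xs) := by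
  rw [a_eq_altGo, alt_eq_pairs]
  have h := pairs_altGo (x :: xs) (by simp) 0
  exact (by simpa using h : pairsMap _ = _).symm

-- ===== VERDICT (by name: the statement is the Claim_ definition above) =====
theorem group_indices_spec : Claim_equal_group_indices := by
  intro input_list _
  unfold Spec_group_indices
  cases input_list with
  | nil => decide
  | cons x xs => exact main_nonempty x xs
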